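-- pv_equiv track=rewrite | github.com/coreygirard/harbor | harbor.py | collateDocs
-- ===== SOURCE A (Python) =====
-- def parsePath(line):
--     '''
--     >>> parsePath('harbor: abc/def/ghi')
--     ('abc', 'abc/def/ghi')
--     '''
--     assert(line.startswith('harbor: '))
--     line = line[len('harbor: '):]
--     line = line.strip()
--     line = line.split('/')
--     return line[0],'/'.join(line)
--
-- def collateDocs(markup):
--     '''
--     >>> raw = [['harbor: readme/example',
--     ...         '',
--     ...         '{TODO}[section]'],
--     ...        ['harbor: readme/another',
--     ...         'sample',
--     ...         '',
--     ...         'test']]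
--     >>> collateDocs(raw) == {'readme':
--     ...                          {'readme/another':
--     ...                              [['harbor: readme/another',
--     ...                                'sample', '', 'test']],
--     ...                           'readme/example':
--     ...                              [['harbor: readme/example',
--     ...                                '',
--     ...                                '{TODO}[section]']]}}
--     True
--     '''
--
--     d = {}
--     for m in markup:
--         assert(m[0].startswith('harbor: '))
--         f,path = parsePath(m[0])
--         if f not in d:
--             d[f] = {}
--         if path not in d[f]:
--             d[f][path] = []
--
--         d[f][path].append(m)
--
--     return d
-- ===== SOURCE B (Python) =====
-- def parsePath(line):
--     assert(line.startswith('harbor: '))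
--     line = line[len('harbor: '):]
--     line = line.strip()
--     line = line.split('/')
--     return line[0],'/'.join(line)
--
-- def collateDocs(markup):
--     triples = []
--     for m in markup:
--         assert(m[0].startswith('harbor: '))
--         f, path = parsePath(m[0])
--         triples.append((f, path, m))
--     return {f: {p: [m for g, q, m in triples if g == f and q == p]
--                 for p in dict.fromkeys(q for g, q, _ in triples if g == f)}
--             for f in dict.fromkeys(g for g, _, _ in triples)}
-- ===== Notes on version B (the rewrite author's own statement) =====
-- stated objective: alternative
-- what changed: Replaces the single pass that incrementally grows a nested dict with a parse pass producing (file, path, block) triples followed by comprehension-based grouping: ordered-dedup key lists (dict.fromkeys) and per-key filters build the nested dict in one expression.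
import Mathlib
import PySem

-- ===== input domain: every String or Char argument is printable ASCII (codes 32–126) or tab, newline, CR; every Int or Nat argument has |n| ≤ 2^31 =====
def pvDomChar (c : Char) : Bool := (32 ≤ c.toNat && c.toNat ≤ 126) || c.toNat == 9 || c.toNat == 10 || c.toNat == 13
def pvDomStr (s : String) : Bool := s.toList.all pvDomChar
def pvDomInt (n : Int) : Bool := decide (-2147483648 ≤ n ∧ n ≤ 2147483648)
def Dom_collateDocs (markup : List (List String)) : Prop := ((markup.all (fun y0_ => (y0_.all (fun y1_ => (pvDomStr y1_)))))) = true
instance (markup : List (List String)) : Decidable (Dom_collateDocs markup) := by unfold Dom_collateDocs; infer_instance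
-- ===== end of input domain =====

-- B replaces A's incremental nested-dict build with a parse pass into (file, path, block) triples
-- followed by comprehension-style grouping (ordered key dedup + per-key filters); same result, alternative decomposition.

-- ===== PORT A =====
-- parsePath: the assert (line.startswith('harbor: ')) holds on every Pre_ input, so it is not re-checked here;
-- line.split('/') with a non-empty separator is PySem.Str.split? (always `some` since "/" ≠ ""), line[0] is headD (split is never empty).
def parsePath (line : String) : String × String :=
  let line1 := PySem.Str.slice line (some 8) none      -- line[len('harbor: '):]
  let line2 := PySem.Str.strip line1
  let parts := (PySem.Str.split? line2 "/").getD []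
  (parts.headD "", PySem.Str.join "/" parts)

def collateDocs (markup : List (List String)) : List (String × List (String × List (List String))) :=
  let d := markup.foldl (fun d m =>
      let fp := parsePath (m.headD "")                 -- m[0]; Pre_ guarantees m ≠ []
      let d1 := if d.contains fp.1 then d else d.insert fp.1 PySem.Dict.empty
      let inner := d1.getD fp.1 PySem.Dict.empty
      let inner1 := if inner.contains fp.2 then inner else inner.insert fp.2 ([] : List (List String))
      let inner2 := inner1.insert fp.2 (inner1.getD fp.2 [] ++ [m])
      d1.insert fp.1 inner2)
    (PySem.Dict.empty : PySem.Dict String (PySem.Dict String (List (List String))))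
  d.items.map (fun q => (q.1, q.2.items))

-- ===== PORT B =====
def collateDocs_alt (markup : List (List String)) : List (String × List (String × List (List String))) :=
  let triples : List (String × String × List String) :=
    markup.foldl (fun acc m =>
      let fp := parsePath (m.headD "")                 -- m[0]; Pre_ guarantees m ≠ []
      acc ++ [(fp.1, fp.2, m)]) []
  (PySem.List.dedup (triples.map (fun t => t.1))).map (fun f =>
    (f, (PySem.List.dedup ((triples.filter (fun t => t.1 == f)).map (fun t => t.2.1))).map (fun p =>
      (p, (triples.filter (fun t => t.1 == f && t.2.1 == p)).map (fun t => t.2.2)))))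

-- ===== PRECONDITION & SPEC =====
-- Pre_ excludes exactly the inputs where the Python raises: a markup list containing an empty block
-- (IndexError on its first element) or a block whose first line lacks the 'harbor: ' prefix (AssertionError).
def Pre_collateDocs (markup : List (List String)) : Prop :=
  ∀ m ∈ markup, m ≠ [] ∧ PySem.Str.startswith (m.headD "") "harbor: " = true
instance (markup : List (List String)) : Decidable (Pre_collateDocs markup) := by unfold Pre_collateDocs; infer_instance

def pvWitness_collateDocs : List (List String) := [["harbor: a/b", "x"], ["harbor: a"]]

def Spec_collateDocs (markup : List (List String)) (out : List (String × List (String × List (List String)))) : Prop := out = collateDocs_alt markup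
instance (markup : List (List String)) (out : List (String × List (String × List (List String)))) : Decidable (Spec_collateDocs markup out) := by unfold Spec_collateDocs; infer_instance

-- ===== CLAIM (what is proved, stated in full; the proofs are below) =====
def Claim_equal_collateDocs : Prop := ∀ (markup : List (List String)), Dom_collateDocs markup → Pre_collateDocs markup → Spec_collateDocs markup (collateDocs markup)

-- ===== LEMMAS AND PROOFS =====

-- the two components of the parsed key of a block
def pvKeyF (m : List String) : String := (parsePath (m.headD "")).1
def pvKeyP (m : List String) : String := (parsePath (m.headD "")).2

-- the triple B's first loop builds from a block
def pvTrip (m : List String) : String × String × List String := (pvKeyF m, pvKeyP m, m)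

-- A's inner two statements are a single modify
lemma innerStep_eq (inner : PySem.Dict String (List (List String))) (p : String) (m : List String) :
    (let inner1 := if inner.contains p then inner else inner.insert p ([] : List (List String))
     inner1.insert p (inner1.getD p [] ++ [m])) = inner.modify p [] (· ++ [m]) := by
  by_cases h : inner.contains p
  · simp only [h, if_true]
    rfl
  · have hget : inner.getD p [] = [] :=
      PySem.Dict.getD_of_not_contains _ _ (by simpa using h)
    simp only [h, Bool.false_eq_true, if_false, PySem.Dict.getD_insert_self,
      PySem.Dict.insert_insert_self]
    show inner.insert p ([] ++ [m]) = inner.insert p (inner.getD p [] ++ [m])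
    rw [hget]

-- A's whole loop body is one nested modify
lemma outerStep_eq (d : PySem.Dict String (PySem.Dict String (List (List String)))) (m : List String) :
    (let fp := parsePath (m.headD "")
     let d1 := if d.contains fp.1 then d else d.insert fp.1 PySem.Dict.empty
     let inner := d1.getD fp.1 PySem.Dict.empty
     let inner1 := if inner.contains fp.2 then inner else inner.insert fp.2 ([] : List (List String))
     let inner2 := inner1.insert fp.2 (inner1.getD fp.2 [] ++ [m])
     d1.insert fp.1 inner2)
    = d.modify (pvKeyF m) PySem.Dict.empty (fun inner => inner.modify (pvKeyP m) [] (· ++ [m])) := by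
  show (let d1 := if d.contains (pvKeyF m) then d else d.insert (pvKeyF m) PySem.Dict.empty
        let inner := d1.getD (pvKeyF m) PySem.Dict.empty
        let inner1 := if inner.contains (pvKeyP m) then inner else inner.insert (pvKeyP m) ([] : List (List String))
        d1.insert (pvKeyF m) (inner1.insert (pvKeyP m) (inner1.getD (pvKeyP m) [] ++ [m]))) = _
  by_cases h : d.contains (pvKeyF m)
  · simp only [h, if_true]
    rw [innerStep_eq (d.getD (pvKeyF m) PySem.Dict.empty) (pvKeyP m) m]
    rfl
  · have hget : d.getD (pvKeyF m) PySem.Dict.empty = PySem.Dict.empty :=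
      PySem.Dict.getD_of_not_contains _ _ (by simpa using h)
    simp only [h, Bool.false_eq_true, if_false, PySem.Dict.getD_insert_self,
      PySem.Dict.insert_insert_self]
    rw [innerStep_eq PySem.Dict.empty (pvKeyP m) m]
    show d.insert (pvKeyF m) (PySem.Dict.empty.modify (pvKeyP m) [] (· ++ [m]))
        = d.insert (pvKeyF m) ((d.getD (pvKeyF m) PySem.Dict.empty).modify (pvKeyP m) [] (· ++ [m]))
    rw [hget]

-- a fold of keyed modifies, read back at one key c, is a fold of just the updates whose key is c
lemma getD_foldl_modifyk {κ ν α : Type} [BEq κ] [LawfulBEq κ] [DecidableEq κ]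
    (l : List α) (k : α → κ) (d0 : ν) (g : α → ν → ν) (d : PySem.Dict κ ν) (c : κ) :
    (l.foldl (fun d t => d.modify (k t) d0 (g t)) d).getD c d0 =
      (l.filter (fun t => k t == c)).foldl (fun x t => g t x) (d.getD c d0) := by
  induction l generalizing d with
  | nil => rfl
  | cons t l ih =>
    simp only [List.foldl_cons, List.filter_cons]
    rw [ih]
    by_cases h : k t = c
    · subst h
      simp only [beq_self_eq_true, if_true, List.foldl_cons, PySem.Dict.getD_modify_self]
    · have hb : (k t == c) = false := by simpa using h
      simp only [hb, Bool.false_eq_true, if_false]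
      rw [PySem.Dict.getD_modify]
      rw [if_neg (fun hc : c = k t => h hc.symm)]

-- A, with its loop body rewritten to the nested modify
lemma collateDocs_eq (markup : List (List String)) :
    collateDocs markup =
      (markup.foldl
        (fun d m => d.modify (pvKeyF m) PySem.Dict.empty (fun inner => inner.modify (pvKeyP m) [] (· ++ [m])))
        (PySem.Dict.empty : PySem.Dict String (PySem.Dict String (List (List String))))).items.map
        (fun q => (q.1, q.2.items)) := by
  unfold collateDocs
  exact congrArg (fun D : PySem.Dict String (PySem.Dict String (List (List String))) =>
    D.items.map (fun q => (q.1, q.2.items)))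
    (PySem.List.foldl_congr_mem markup
      (fun d m =>
        let fp := parsePath (m.headD "")
        let d1 := if d.contains fp.1 then d else d.insert fp.1 PySem.Dict.empty
        let inner := d1.getD fp.1 PySem.Dict.empty
        let inner1 := if inner.contains fp.2 then inner else inner.insert fp.2 ([] : List (List String))
        let inner2 := inner1.insert fp.2 (inner1.getD fp.2 [] ++ [m])
        d1.insert fp.1 inner2)
      (fun d m => d.modify (pvKeyF m) PySem.Dict.empty (fun inner => inner.modify (pvKeyP m) [] (· ++ [m])))
      PySem.Dict.empty
      (fun acc m _ => outerStep_eq acc m))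

-- B's first loop builds exactly the list of parsed triples
lemma triples_eq (markup : List (List String)) :
    markup.foldl (fun acc m =>
      let fp := parsePath (m.headD "")
      acc ++ [(fp.1, fp.2, m)]) ([] : List (String × String × List String)) =
    markup.map pvTrip := by
  rw [PySem.List.foldl_congr_mem markup
    (fun acc m =>
      let fp := parsePath (m.headD "")
      acc ++ [(fp.1, fp.2, m)])
    (fun acc m => acc ++ [pvTrip m])
    [] (fun acc m _ => rfl)]
  rw [PySem.List.foldl_append_singleton_eq_map, List.nil_append]

-- B, with the triples list replaced by that map
lemma collateDocs_alt_eq (markup : List (List String)) :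
    collateDocs_alt markup =
      (PySem.List.dedup ((markup.map pvTrip).map (fun t => t.1))).map (fun f =>
        (f, (PySem.List.dedup (((markup.map pvTrip).filter (fun t => t.1 == f)).map (fun t => t.2.1))).map (fun p =>
          (p, ((markup.map pvTrip).filter (fun t => t.1 == f && t.2.1 == p)).map (fun t => t.2.2))))) := by
  unfold collateDocs_alt
  exact congrArg (fun T : List (String × String × List String) =>
    (PySem.List.dedup (T.map (fun t => t.1))).map (fun f =>
      (f, (PySem.List.dedup ((T.filter (fun t => t.1 == f)).map (fun t => t.2.1))).map (fun p =>
        (p, (T.filter (fun t => t.1 == f && t.2.1 == p)).map (fun t => t.2.2))))))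
    (triples_eq markup)

theorem collateDocs_spec : Claim_equal_collateDocs := by
  intro markup _ _
  show collateDocs markup = collateDocs_alt markup
  rw [collateDocs_eq, collateDocs_alt_eq]
  -- push the triple projections through map/filter on B's side
  simp only [List.map_map, List.filter_map, Function.comp_def, pvTrip,
    PySem.List.dedup_eq_ofList]
  set D := markup.foldl
      (fun d m => d.modify (pvKeyF m) PySem.Dict.empty (fun inner => inner.modify (pvKeyP m) [] (· ++ [m])))
      (PySem.Dict.empty : PySem.Dict String (PySem.Dict String (List (List String)))) with hD
  have hndD : D.keys.Nodup := by
    rw [hD]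
    exact PySem.Dict.nodup_keys_foldl_modify_key markup pvKeyF PySem.Dict.empty _ _ (by simp)
  have hkeysD : D.keys = PySem.Set.ofList (markup.map pvKeyF) := by
    rw [hD, PySem.Dict.keys_foldl_modify_key]
    simp [PySem.Set.update_nil_left]
  rw [PySem.Dict.items_eq_map_keys D hndD PySem.Dict.empty, hkeysD, List.map_map]
  apply List.map_congr_left
  intro f hf
  simp only [Function.comp_def, Prod.mk.injEq, true_and]
  have hDf : D.getD f PySem.Dict.empty =
      (markup.filter (fun m => pvKeyF m == f)).foldl
        (fun inner m => inner.modify (pvKeyP m) [] (· ++ [m])) PySem.Dict.empty := by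
    rw [hD, getD_foldl_modifyk markup pvKeyF PySem.Dict.empty _ PySem.Dict.empty f]
    rfl
  have hndI : (D.getD f PySem.Dict.empty).keys.Nodup := by
    rw [hDf]
    exact PySem.Dict.nodup_keys_foldl_modify_key _ pvKeyP [] _ _ (by simp)
  have hkeysI : (D.getD f PySem.Dict.empty).keys =
      PySem.Set.ofList ((markup.filter (fun m => pvKeyF m == f)).map pvKeyP) := by
    rw [hDf, PySem.Dict.keys_foldl_modify_key]
    simp [PySem.Set.update_nil_left]
  rw [PySem.Dict.items_eq_map_keys _ hndI [], hkeysI]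
  apply List.map_congr_left
  intro p hp
  simp only [Prod.mk.injEq, true_and, List.map_id']
  rw [hDf, getD_foldl_modifyk _ pvKeyP [] _ PySem.Dict.empty p]
  rw [PySem.Dict.getD_empty, PySem.List.foldl_append_singleton_eq_self, List.nil_append]
  rw [List.filter_filter]
  apply List.filter_congr
  intro m _
  exact Bool.and_comm _ _
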